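-- pv_equiv track=rewrite | github.com/Saturno10/Tarea-Practica-ALF | entonar.py | entonar_sin_tilde
-- ===== SOURCE A (Python) =====
-- def entonar_sin_tilde(silaba):
--     vocales = 0
--     nueva_silaba = ""
--     for letra in silaba:
--         if letra in "aeiou":
--             vocales += 1
--     if vocales == 3:
--         central = False
--         for letra in silaba:
--             if letra in "aeiou" and not central:
--                 central = True
--                 nueva_silaba += letra
--             elif letra in "aeiou" and central:
--                 nueva_silaba += letra.upper()
--
--     elif vocales == 2:
--         segunda = False
--         for letra in silaba:
--             if letra in "aeo":
--                 nueva_silaba += letra.upper()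
--
--             elif letra in "iu":
--                 if segunda:
--                     nueva_silaba += letra.upper()
--                 else:
--                     segunda = True
--                     nueva_silaba += letra
--             else:
--                 nueva_silaba += letra
--     else:
--
--         for letra in silaba:
--             if letra in "aeiou":
--                 nueva_silaba += letra.upper()
--             else:
--                 nueva_silaba += letra
--     return nueva_silaba
-- ===== SOURCE B (Python) =====
-- def entonar_sin_tilde(silaba):
--     # Uppercase every vowel eagerly via a translation table, then repair:
--     # with exactly 2 vowels, restore the first weak vowel (iu) by splicing;
--     # with exactly 3 vowels, keep only the vowels, first one lowercase.
--     up = silaba.translate(str.maketrans("aeiou", "AEIOU"))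
--     v = "".join(c for c in silaba if c in "aeiou")
--     if len(v) == 3:
--         return v[:1] + v[1:].upper()
--     if len(v) == 2:
--         for i, c in enumerate(silaba):
--             if c in "iu":
--                 return up[:i] + c + up[i+1:]
--         return up
--     return up
-- ===== Notes on version B (the rewrite author's own statement) =====
-- stated objective: alternative
-- what changed: Instead of A's three flag-driven accumulation loops built by repeated string concatenation, B uppercases every vowel at once with str.translate and then repairs the special counts by a targeted edit: with 2 vowels it splices the original first weak vowel back by slicing around its index, with 3 vowels it keeps only the vowels and uppercases the tail slice.
import Mathlib
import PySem

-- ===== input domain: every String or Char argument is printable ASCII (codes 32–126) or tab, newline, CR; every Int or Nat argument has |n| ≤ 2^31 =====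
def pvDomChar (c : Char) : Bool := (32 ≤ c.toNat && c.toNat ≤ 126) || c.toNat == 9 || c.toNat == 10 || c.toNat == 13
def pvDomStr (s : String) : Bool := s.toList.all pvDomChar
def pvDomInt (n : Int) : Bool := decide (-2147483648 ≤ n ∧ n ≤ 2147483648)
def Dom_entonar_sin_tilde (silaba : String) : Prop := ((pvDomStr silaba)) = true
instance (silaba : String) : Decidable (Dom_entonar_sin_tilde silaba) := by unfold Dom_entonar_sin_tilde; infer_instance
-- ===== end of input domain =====

-- B uppercases every vowel at once via a translation table and then repairs the two
-- special counts by a targeted edit (splice back the first weak vowel / keep only the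
-- vowels), instead of A's three flag-driven accumulation loops (objective: alternative).

-- ===== PORT A =====
-- letra in "aeiou" (single char) = membership in the char list
def pvVow (c : Char) : Bool := "aeiou".toList.contains c
def pvStrong (c : Char) : Bool := "aeo".toList.contains c
def pvWeak (c : Char) : Bool := "iu".toList.contains c

def entonar_sin_tilde (silaba : String) : String :=
  let cs := silaba.toList
  let vocales : Int := cs.foldl (fun v letra => if pvVow letra then v + 1 else v) 0
  let nueva : List Char :=
    if vocales = 3 then
      (cs.foldl (fun (st : Bool × List Char) letra =>
          if pvVow letra && !st.1 then (true, st.2 ++ [letra])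
          else if pvVow letra && st.1 then (st.1, st.2 ++ [PySem.Chars.upperChar letra])
          else st)
        (false, [])).2
    else if vocales = 2 then
      (cs.foldl (fun (st : Bool × List Char) letra =>
          if pvStrong letra then (st.1, st.2 ++ [PySem.Chars.upperChar letra])
          else if pvWeak letra then
            (if st.1 then (st.1, st.2 ++ [PySem.Chars.upperChar letra])
             else (true, st.2 ++ [letra]))
          else (st.1, st.2 ++ [letra]))
        (false, [])).2
    else
      cs.foldl (fun acc letra =>
        if pvVow letra then acc ++ [PySem.Chars.upperChar letra] else acc ++ [letra]) []
  String.ofList nueva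

-- ===== PORT B =====
-- silaba.translate(str.maketrans("aeiou", "AEIOU")): a per-character table lookup (exact:
-- maketrans with 1-char keys maps each character independently)
def pvUpTable (c : Char) : Char :=
  if c = 'a' then 'A' else if c = 'e' then 'E' else if c = 'i' then 'I'
  else if c = 'o' then 'O' else if c = 'u' then 'U' else c

-- the enumerate loop with early return: index and character of the first weak vowel
def pvFindWeak : List Char → Int → Option (Int × Char)
  | [], _ => none
  | c :: cs, i => if pvWeak c then some (i, c) else pvFindWeak cs (i + 1)

def entonar_sin_tilde_alt (silaba : String) : String :=
  let cs := silaba.toList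
  let up := cs.map pvUpTable
  let v := cs.filter pvVow
  if v.length = 3 then
    String.ofList (PySem.List.slice v none (some 1) ++
      PySem.Chars.upper (PySem.List.slice v (some 1) none))
  else if v.length = 2 then
    match pvFindWeak cs 0 with
    | some (i, c) => String.ofList (PySem.List.slice up none (some i) ++ [c] ++
        PySem.List.slice up (some (i + 1)) none)
    | none => String.ofList up
  else
    String.ofList up

-- ===== PRECONDITION & SPEC =====
def Spec_entonar_sin_tilde (silaba : String) (out : String) : Prop := out = entonar_sin_tilde_alt silaba
instance (silaba : String) (out : String) : Decidable (Spec_entonar_sin_tilde silaba out) := by unfold Spec_entonar_sin_tilde; infer_instance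

-- ===== CLAIM (what is proved, stated in full; the proofs are below) =====
def Claim_equal_entonar_sin_tilde : Prop := ∀ (silaba : String), Dom_entonar_sin_tilde silaba → Spec_entonar_sin_tilde silaba (entonar_sin_tilde silaba)

-- ===== LEMMAS AND PROOFS =====

theorem pv_vow_cases (c : Char) : pvVow c = (pvStrong c || pvWeak c) := by
  unfold pvVow pvStrong pvWeak
  by_cases h1 : c = 'a' <;> by_cases h2 : c = 'e' <;> by_cases h3 : c = 'i' <;>
    by_cases h4 : c = 'o' <;> by_cases h5 : c = 'u' <;>
    simp [List.contains_eq_mem, h1, h2, h3, h4, h5]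

def pvM (c : Char) : Char := if pvVow c then PySem.Chars.upperChar c else c

theorem pv_table_eq (c : Char) : pvUpTable c = pvM c := by
  by_cases h1 : c = 'a'; · subst h1; decide
  by_cases h2 : c = 'e'; · subst h2; decide
  by_cases h3 : c = 'i'; · subst h3; decide
  by_cases h4 : c = 'o'; · subst h4; decide
  by_cases h5 : c = 'u'; · subst h5; decide
  have hv : pvVow c = false := by
    unfold pvVow; simp [List.contains_eq_mem, h1, h2, h3, h4, h5]
  simp [pvUpTable, pvM, h1, h2, h3, h4, h5, hv]

def pvLow3 : List Char → List Char
  | [] => []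
  | v :: vs => v :: vs.map PySem.Chars.upperChar

def pvH : List Char → List Char
  | [] => []
  | c :: cs => if pvWeak c then c :: cs.map pvM else pvM c :: pvH cs

theorem pv_count (cs : List Char) : ∀ (a : Int),
    cs.foldl (fun v c => if pvVow c then v + 1 else v) a = a + (cs.filter pvVow).length := by
  induction cs with
  | nil => simp
  | cons c cs ih =>
    intro a
    rw [List.foldl_cons, ih]
    by_cases h : pvVow c <;> simp [h] <;> omega

theorem pv_fold3 (cs : List Char) : ∀ (st : Bool × List Char),
    (cs.foldl (fun (st : Bool × List Char) letra =>
        if pvVow letra && !st.1 then (true, st.2 ++ [letra])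
        else if pvVow letra && st.1 then (st.1, st.2 ++ [PySem.Chars.upperChar letra])
        else st) st).2
    = st.2 ++ (if st.1 then (cs.filter pvVow).map PySem.Chars.upperChar
               else pvLow3 (cs.filter pvVow)) := by
  induction cs with
  | nil => intro st; cases st with | mk b acc => cases b <;> simp [pvLow3]
  | cons c cs ih =>
    intro st
    rw [List.foldl_cons, ih]
    cases st with
    | mk b acc =>
      by_cases hv : pvVow c <;> cases b <;> simp [hv, pvLow3]

theorem pv_fold2 (cs : List Char) : ∀ (st : Bool × List Char),
    (cs.foldl (fun (st : Bool × List Char) letra =>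
        if pvStrong letra then (st.1, st.2 ++ [PySem.Chars.upperChar letra])
        else if pvWeak letra then
          (if st.1 then (st.1, st.2 ++ [PySem.Chars.upperChar letra])
           else (true, st.2 ++ [letra]))
        else (st.1, st.2 ++ [letra])) st).2
    = st.2 ++ (if st.1 then cs.map pvM else pvH cs) := by
  induction cs with
  | nil => intro st; cases st with | mk b acc => cases b <;> simp [pvH]
  | cons c cs ih =>
    intro st
    rw [List.foldl_cons, ih]
    cases st with
    | mk b acc =>
      by_cases hs : pvStrong c
      · have hv : pvVow c := by rw [pv_vow_cases]; simp [hs]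
        have hw : pvWeak c = false := by
          by_contra h
          simp [pvStrong, pvWeak] at hs h
          rcases hs with h1 | h1 | h1 <;> subst h1 <;> simp at h
        cases b <;> simp [hs, hw, pvH, pvM, hv]
      · by_cases hw : pvWeak c
        · have hv : pvVow c := by rw [pv_vow_cases]; simp [hw]
          cases b <;> simp [hs, hw, pvH, pvM, hv]
        · have hv : pvVow c = false := by rw [pv_vow_cases]; simp [hs, hw]
          cases b <;> simp [hs, hw, pvH, pvM, hv]

theorem pv_fold_other (cs : List Char) : ∀ (acc : List Char),
    cs.foldl (fun acc letra =>
      if pvVow letra then acc ++ [PySem.Chars.upperChar letra] else acc ++ [letra]) acc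
    = acc ++ cs.map pvM := by
  induction cs with
  | nil => simp
  | cons c cs ih =>
    intro acc
    rw [List.foldl_cons, ih]
    by_cases hv : pvVow c <;> simp [hv, pvM]

theorem pv_low3_take (vs : List Char) :
    vs.take 1 ++ (vs.drop 1).map PySem.Chars.upperChar = pvLow3 vs := by
  cases vs <;> simp [pvLow3]

-- B's splice around the first weak vowel equals A's flag-driven 2-vowel pass
theorem pv_main (cs : List Char) : ∀ (pre : List Char), (∀ c ∈ pre, pvWeak c = false) →
    (match pvFindWeak cs (pre.length : Int) with
     | some (i, ch) =>
         PySem.List.slice ((pre ++ cs).map pvM) none (some i) ++ [ch] ++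
         PySem.List.slice ((pre ++ cs).map pvM) (some (i + 1)) none
     | none => (pre ++ cs).map pvM)
    = pre.map pvM ++ pvH cs := by
  induction cs with
  | nil => intro pre _; simp [pvFindWeak, pvH]
  | cons c cs ih =>
    intro pre hpre
    by_cases hw : pvWeak c
    · have h1 : PySem.List.slice (List.map pvM pre ++ pvM c :: List.map pvM cs) none
          (some (pre.length : Int)) = List.map pvM pre := by
        rw [PySem.List.slice_to_natCast]
        have hln : pre.length = (List.map pvM pre).length := by simp
        rw [hln, List.take_left]
      have h2 : PySem.List.slice (List.map pvM pre ++ pvM c :: List.map pvM cs)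
          (some ((pre.length : Int) + 1)) none = List.map pvM cs := by
        have hc : ((pre.length : Int) + 1) = ((pre.length + 1 : Nat) : Int) := by push_cast; ring
        rw [hc, PySem.List.slice_from_natCast]
        have hl : (List.map pvM pre ++ pvM c :: List.map pvM cs)
            = (List.map pvM pre ++ [pvM c]) ++ List.map pvM cs := by simp
        have hln : (List.map pvM pre ++ [pvM c]).length = pre.length + 1 := by simp
        rw [hl, ← hln, List.drop_left]
      simp [pvFindWeak, hw, h1, h2, pvH]
    · have hstep : pvFindWeak (c :: cs) (pre.length : Int)
          = pvFindWeak cs (((pre ++ [c]).length : Nat) : Int) := by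
        simp [pvFindWeak, hw]
      have := ih (pre ++ [c]) (by
        intro d hd
        rcases List.mem_append.mp hd with h | h
        · exact hpre d h
        · simp at h; subst h; exact eq_false_of_ne_true hw)
      rw [List.append_assoc] at this
      simp only [List.singleton_append] at this
      rw [hstep, this]
      simp [pvH, hw, pvM]

-- ===== VERDICT (by name: the statement is the Claim_ definition above) =====
theorem entonar_sin_tilde_spec : Claim_equal_entonar_sin_tilde := by
  intro silaba _
  unfold Spec_entonar_sin_tilde entonar_sin_tilde entonar_sin_tilde_alt
  have hup : silaba.toList.map pvUpTable = silaba.toList.map pvM :=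
    List.map_congr_left (fun c _ => pv_table_eq c)
  simp only [pv_count, zero_add, hup]
  by_cases h3 : (silaba.toList.filter pvVow).length = 3
  · rw [if_pos (by omega : ((silaba.toList.filter pvVow).length : Int) = 3), if_pos h3,
      pv_fold3]
    have hs1 : PySem.List.slice (silaba.toList.filter pvVow) none (some 1)
        = (silaba.toList.filter pvVow).take 1 := by
      rw [PySem.List.slice_to _ (by norm_num)]; rfl
    have hs2 : PySem.List.slice (silaba.toList.filter pvVow) (some 1) none
        = (silaba.toList.filter pvVow).drop 1 := by
      rw [PySem.List.slice_from _ (by norm_num)]; rfl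
    rw [hs1, hs2]
    have hupp : PySem.Chars.upper ((silaba.toList.filter pvVow).drop 1)
        = ((silaba.toList.filter pvVow).drop 1).map PySem.Chars.upperChar := by
      simp [PySem.Chars.upper]
    rw [hupp, pv_low3_take]
    simp
  · by_cases h2 : (silaba.toList.filter pvVow).length = 2
    · rw [if_neg (by omega : ¬ ((silaba.toList.filter pvVow).length : Int) = 3),
        if_pos (by omega : ((silaba.toList.filter pvVow).length : Int) = 2),
        if_neg h3, if_pos h2, pv_fold2]
      have hm := pv_main silaba.toList [] (by intro c h; simp at h)
      simp only [List.length_nil, Nat.cast_zero, List.nil_append, List.map_nil] at hm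
      cases hfw : pvFindWeak silaba.toList 0 with
      | none =>
        rw [hfw] at hm
        simp [← hm]
      | some p =>
        rw [hfw] at hm
        cases p with
        | mk i ch =>
          simp [← hm]
    · rw [if_neg (by omega : ¬ ((silaba.toList.filter pvVow).length : Int) = 3),
        if_neg (by omega : ¬ ((silaba.toList.filter pvVow).length : Int) = 2),
        if_neg h3, if_neg h2, pv_fold_other]
      rfl
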